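-- pv_equiv track=rewrite | github.com/K-Hirooka-Aizu/skeleton-slr-transformer | src/sstan/video_dataset.py | sequential_sampling
-- ===== SOURCE A (Python) =====
-- def sequential_sampling(frame_start, frame_end, num_samples):
--     num_frames = frame_end - frame_start + 1
--     frames_to_sample = []
--
--     if num_frames > num_samples:
--         frames_skip = set()
--         num_skips = num_frames - num_samples
--         interval = max(1, num_frames // num_skips)
--
--         for i in range(frame_start, frame_end + 1):
--             if i % interval == 0 and len(frames_skip) < num_skips:
--                 frames_skip.add(i)
--
--         for i in range(frame_start, frame_end + 1):
--             if i not in frames_skip: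
--                 frames_to_sample.append(i)
--     else:
--         frames_to_sample = list(range(frame_start, frame_end + 1))
--         frames_to_sample.extend(
--             [frame_end] * (num_samples - num_frames)
--         )
--
--     return frames_to_sample
-- ===== SOURCE B (Python) =====
-- def sequential_sampling(frame_start, frame_end, num_samples):
--     num_frames = frame_end - frame_start + 1
--     if num_frames <= num_samples:
--         return list(range(frame_start, frame_end + 1)) + [frame_end] * (num_samples - num_frames)
--     num_skips = num_frames - num_samples
--     interval = max(1, num_frames // num_skips)
--     # smallest multiple of interval that is >= frame_start (these are exactly the
--     # frames A's skip set holds, capped at num_skips)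
--     first = -(-frame_start // interval) * interval
--     skips = list(range(first, frame_end + 1, interval))[:num_skips]
--     result = []
--     prev = frame_start
--     for s in skips:
--         result.extend(range(prev, s))
--         prev = s + 1
--     result.extend(range(prev, frame_end + 1))
--     return result
-- ===== Notes on version B (the rewrite author's own statement) =====
-- stated objective: alternative
-- what changed: Instead of A's per-frame scans (one pass testing i % interval == 0 to fill a skip set, a second pass filtering the range by set membership), B computes the skipped frames in closed form as an arithmetic progression (the multiples of interval from the first multiple >= frame_start, capped at num_skips) and assembles the result by concatenating the contiguous segments between consecutive skip points.
import Mathlib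
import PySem

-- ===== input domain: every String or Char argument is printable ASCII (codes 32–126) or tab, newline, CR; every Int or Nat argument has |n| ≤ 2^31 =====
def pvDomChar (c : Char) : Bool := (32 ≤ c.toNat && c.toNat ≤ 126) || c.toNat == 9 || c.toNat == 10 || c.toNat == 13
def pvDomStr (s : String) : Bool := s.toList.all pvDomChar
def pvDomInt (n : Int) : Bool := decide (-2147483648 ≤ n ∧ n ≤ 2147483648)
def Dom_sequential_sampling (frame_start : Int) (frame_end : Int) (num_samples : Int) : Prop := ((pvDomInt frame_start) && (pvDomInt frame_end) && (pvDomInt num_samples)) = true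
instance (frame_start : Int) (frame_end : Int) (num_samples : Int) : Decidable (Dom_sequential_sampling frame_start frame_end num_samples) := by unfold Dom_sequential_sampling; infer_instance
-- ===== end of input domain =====

-- B replaces A's per-frame modulo scan and skip set with a closed-form computation of the
-- skipped frames (an arithmetic progression) and builds the output as concatenated contiguous
-- segments between them; objective: alternative (same output, no set, no per-frame test).

-- ===== PORT A =====
-- first loop of A: build the skip set over the range
def seqSampSkipSet (interval : Int) (num_skips : Int) (l : List Int) (s : PySem.Set Int) : PySem.Set Int :=
  l.foldl (fun s i =>
    if PySem.Int.mod i interval = 0 ∧ PySem.Set.len s < num_skips then PySem.Set.add s i else s) s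

def sequential_sampling (frame_start : Int) (frame_end : Int) (num_samples : Int) : List Int :=
  let num_frames := frame_end - frame_start + 1
  if num_frames > num_samples then
    let num_skips := num_frames - num_samples
    let interval := max 1 (PySem.Int.floordiv num_frames num_skips)
    let frames_skip := seqSampSkipSet interval num_skips (PySem.List.pyRange frame_start (frame_end + 1) 1) PySem.Set.empty
    (PySem.List.pyRange frame_start (frame_end + 1) 1).foldl
      (fun acc i => if i ∉ frames_skip then acc ++ [i] else acc) []
  else
    PySem.List.pyRange frame_start (frame_end + 1) 1
      ++ List.replicate (num_samples - num_frames).toNat frame_end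

-- ===== PORT B =====
-- B's loop: for each skip point s, emit the contiguous segment range(prev, s)
def seqSegLoop (skips : List Int) (st : Int × List Int) : Int × List Int :=
  skips.foldl (fun st s => (s + 1, st.2 ++ PySem.List.pyRange st.1 s 1)) st

def sequential_sampling_alt (frame_start : Int) (frame_end : Int) (num_samples : Int) : List Int :=
  let num_frames := frame_end - frame_start + 1
  if num_frames ≤ num_samples then
    PySem.List.pyRange frame_start (frame_end + 1) 1
      ++ List.replicate (num_samples - num_frames).toNat frame_end
  else
    let num_skips := num_frames - num_samples
    let interval := max 1 (PySem.Int.floordiv num_frames num_skips)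
    -- smallest multiple of interval ≥ frame_start, = -(-frame_start // interval) * interval
    let first := -(PySem.Int.floordiv (-frame_start) interval) * interval
    let skips := (PySem.List.pyRange first (frame_end + 1) interval).take num_skips.toNat
    let st := seqSegLoop skips (frame_start, [])
    st.2 ++ PySem.List.pyRange st.1 (frame_end + 1) 1

-- ===== PRECONDITION & SPEC =====
def Spec_sequential_sampling (frame_start : Int) (frame_end : Int) (num_samples : Int) (out : List Int) : Prop := out = sequential_sampling_alt frame_start frame_end num_samples
instance (frame_start : Int) (frame_end : Int) (num_samples : Int) (out : List Int) : Decidable (Spec_sequential_sampling frame_start frame_end num_samples out) := by unfold Spec_sequential_sampling; infer_instance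

-- ===== CLAIM (what is proved, stated in full; the proofs are below) =====
def Claim_equal_sequential_sampling : Prop := ∀ (frame_start : Int) (frame_end : Int) (num_samples : Int), Dom_sequential_sampling frame_start frame_end num_samples → Spec_sequential_sampling frame_start frame_end num_samples (sequential_sampling frame_start frame_end num_samples)

-- ===== LEMMAS AND PROOFS =====

-- A's skip set holds exactly the first (num_skips − |s|) multiples of interval in l
theorem skipSet_mem (v k : Int) (l : List Int) (hl : l.Nodup) (s : PySem.Set Int)
    (hd : ∀ x ∈ l, x ∉ s) (x : Int) :
    x ∈ seqSampSkipSet v k l s ↔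
      x ∈ s ∨ x ∈ (l.filter (fun i => decide (PySem.Int.mod i v = 0))).take (k - PySem.Set.len s).toNat := by
  induction l generalizing s with
  | nil => simp [seqSampSkipSet]
  | cons i t ih =>
    have hit : i ∉ t := (List.nodup_cons.mp hl).1
    have ht : t.Nodup := (List.nodup_cons.mp hl).2
    have hi : i ∉ s := hd i List.mem_cons_self
    have hstep : seqSampSkipSet v k (i :: t) s
        = seqSampSkipSet v k t
            (if PySem.Int.mod i v = 0 ∧ PySem.Set.len s < k then PySem.Set.add s i else s) := rfl
    rw [hstep]
    by_cases hm : PySem.Int.mod i v = 0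
    · by_cases hlen : PySem.Set.len s < k
      · rw [if_pos ⟨hm, hlen⟩]
        have hd' : ∀ y ∈ t, y ∉ PySem.Set.add s i := by
          intro y hy
          rw [PySem.Set.mem_add]
          push_neg
          exact ⟨hd y (List.mem_cons_of_mem _ hy), fun hyi => absurd (hyi ▸ hy) hit⟩
        rw [ih ht _ hd']
        have hlen' : PySem.Set.len (PySem.Set.add s i) = PySem.Set.len s + 1 := by
          rw [PySem.Set.add_of_not_mem hi]; simp [PySem.Set.len]
        have htake : (k - PySem.Set.len s).toNat
            = (k - PySem.Set.len (PySem.Set.add s i)).toNat + 1 := by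
          rw [hlen']; omega
        rw [htake, List.filter_cons_of_pos (by simp [hm]), List.take_succ_cons]
        simp only [PySem.Set.mem_add, List.mem_cons]
        tauto
      · rw [if_neg (fun hc => hlen hc.2)]
        rw [ih ht s (fun y hy => hd y (List.mem_cons_of_mem _ hy))]
        have h0 : (k - PySem.Set.len s).toNat = 0 := by omega
        rw [h0]
        simp
    · rw [if_neg (fun hc => hm hc.1)]
      rw [ih ht s (fun y hy => hd y (List.mem_cons_of_mem _ hy))]
      rw [List.filter_cons_of_neg (by simp [hm])]

-- stepped range: nil and cons forms (0 < v)
theorem pyRange_pos_eq_nil (v : Int) (hv : 0 < v) (f b : Int) (h : b ≤ f) :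
    PySem.List.pyRange f b v = [] := by
  rw [PySem.List.pyRange_of_pos _ _ hv]
  simp [not_lt.mpr h]

theorem pyRange_pos_cons (v : Int) (hv : 0 < v) (f b : Int) (h : f < b) :
    PySem.List.pyRange f b v = f :: PySem.List.pyRange (f + v) b v := by
  rw [PySem.List.pyRange_of_pos _ _ hv, PySem.List.pyRange_of_pos _ _ hv, if_pos h]
  have hne : v ≠ 0 := by omega
  have key : (b - f + v - 1) / v = (b - (f + v) + v - 1) / v + 1 := by
    have e : b - f + v - 1 = (b - (f + v) + v - 1) + 1 * v := by ring
    rw [e, Int.add_mul_ediv_right _ _ hne]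
  by_cases h2 : f + v < b
  · rw [if_pos h2]
    have hge : (0:Int) ≤ (b - (f + v) + v - 1) / v := Int.ediv_nonneg (by omega) (by omega)
    have hcount : ((b - f + v - 1) / v).toNat = ((b - (f + v) + v - 1) / v).toNat + 1 := by omega
    rw [hcount, List.range_succ_eq_map, List.map_cons, List.map_map]
    congr 1
    · simp
    · refine List.map_congr_left (fun a _ => ?_)
      simp only [Function.comp_apply]
      push_cast
      ring
  · rw [if_neg h2]
    have hz : (b - (f + v) + v - 1) / v = 0 := Int.ediv_eq_zero_of_lt (by omega) (by omega)
    have hcount : ((b - f + v - 1) / v).toNat = 1 := by omega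
    rw [hcount]
    simp

-- the multiples of v in range(a, b) form the stepped range starting at the first multiple ≥ a
theorem filter_mod_pyRange (v : Int) (hv : 0 < v) :
    ∀ (n : Nat) (a b f : Int), (b - a).toNat = n → v ∣ f → a ≤ f → f < a + v →
    (PySem.List.pyRange a b 1).filter (fun i => decide (PySem.Int.mod i v = 0))
      = PySem.List.pyRange f b v := by
  intro n
  induction n with
  | zero =>
    intro a b f hn hdf h1 h2
    rw [PySem.List.pyRange_one_eq_nil (by omega), pyRange_pos_eq_nil v hv f b (by omega)]
    rfl
  | succ n ih =>
    intro a b f hn hdf h1 h2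
    have hab : a < b := by omega
    rw [PySem.List.pyRange_one_cons hab]
    by_cases hda : v ∣ a
    · have hfa : f = a := by
        have hd2 : v ∣ (f - a) := dvd_sub hdf hda
        have hm1 : (f - a) % v = 0 := Int.emod_eq_zero_of_dvd hd2
        have hm2 : (f - a) % v = f - a := Int.emod_eq_of_lt (by omega) (by omega)
        omega
      rw [List.filter_cons_of_pos (by simp [PySem.Int.mod_eq_zero_iff_dvd, hda]),
        hfa, pyRange_pos_cons v hv a b hab]
      congr 1
      exact ih (a + 1) b (a + v) (by omega) (hda.add (dvd_refl v)) (by omega) (by omega)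
    · have hfa : f ≠ a := fun hh => hda (hh ▸ hdf)
      rw [List.filter_cons_of_neg (by simp [PySem.Int.mod_eq_zero_iff_dvd, hda])]
      exact ih (a + 1) b f (by omega) hdf (by omega) (by omega)

-- B's segment loop computes the range filtered by non-membership in the skip list
theorem segLoop_filter (b : Int) (skips : List Int) (hs : skips.Pairwise (· < ·))
    (hub : ∀ x ∈ skips, x < b) (prev : Int) (hlb : ∀ x ∈ skips, prev ≤ x) (acc : List Int) :
    (seqSegLoop skips (prev, acc)).2
        ++ PySem.List.pyRange (seqSegLoop skips (prev, acc)).1 b 1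
      = acc ++ (PySem.List.pyRange prev b 1).filter (fun i => decide (i ∉ skips)) := by
  induction skips generalizing prev acc with
  | nil =>
    simp only [seqSegLoop, List.foldl_nil]
    have he : (PySem.List.pyRange prev b 1).filter (fun i => decide (i ∉ ([] : List Int)))
        = PySem.List.pyRange prev b 1 := by
      apply List.filter_eq_self.mpr
      intro x hx
      simp
    rw [he]
  | cons s rest ih =>
    have hps : prev ≤ s := hlb s List.mem_cons_self
    have hsb : s < b := hub s List.mem_cons_self
    have hrest_gt : ∀ x ∈ rest, s < x := (List.pairwise_cons.mp hs).1
    have hstep : seqSegLoop (s :: rest) (prev, acc)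
        = seqSegLoop rest (s + 1, acc ++ PySem.List.pyRange prev s 1) := rfl
    rw [hstep,
      ih (List.pairwise_cons.mp hs).2 (fun x hx => hub x (List.mem_cons_of_mem _ hx)) (s + 1)
        (fun x hx => by have := hrest_gt x hx; omega) (acc ++ PySem.List.pyRange prev s 1),
      PySem.List.pyRange_one_append prev s b hps (by omega),
      PySem.List.pyRange_one_cons hsb,
      List.filter_append, List.filter_cons_of_neg (by simp)]
    have e1 : (PySem.List.pyRange prev s 1).filter (fun i => decide (i ∉ (s :: rest)))
        = PySem.List.pyRange prev s 1 := by
      apply List.filter_eq_self.mpr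
      intro x hx
      have hxs := (PySem.List.mem_pyRange_one.mp hx).2
      simp only [decide_eq_true_eq, List.mem_cons]
      push_neg
      exact ⟨by omega, fun hxr => absurd (hrest_gt x hxr) (by omega)⟩
    have e2 : (PySem.List.pyRange (s + 1) b 1).filter (fun i => decide (i ∉ (s :: rest)))
        = (PySem.List.pyRange (s + 1) b 1).filter (fun i => decide (i ∉ rest)) := by
      apply List.filter_congr
      intro x hx
      have hxs := (PySem.List.mem_pyRange_one.mp hx).1
      apply decide_eq_decide.mpr
      simp only [List.mem_cons, not_or]
      constructor
      · rintro ⟨_, h2⟩; exact h2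
      · intro h2; exact ⟨by omega, h2⟩
    rw [e1, e2, List.append_assoc]

theorem sequential_sampling_spec : Claim_equal_sequential_sampling := by
  intro fs fe ns _
  unfold Spec_sequential_sampling sequential_sampling sequential_sampling_alt
  by_cases h : fe - fs + 1 > ns
  · have h2 : ¬ (fe - fs + 1 ≤ ns) := by omega
    simp only [if_pos h, if_neg h2]
    set v := max 1 (PySem.Int.floordiv (fe - fs + 1) (fe - fs + 1 - ns)) with hVdef
    have hv : (0:Int) < v := lt_of_lt_of_le Int.one_pos (le_max_left _ _)
    set q := -(PySem.Int.floordiv (-fs) v) with hq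
    obtain ⟨hq1, hq2⟩ := (PySem.Int.neg_floordiv_neg_eq_iff_of_pos hv).mp hq.symm
    have hskip : ((PySem.List.pyRange fs (fe + 1) 1).filter
          (fun i => decide (PySem.Int.mod i v = 0)))
        = PySem.List.pyRange (q * v) (fe + 1) v :=
      filter_mod_pyRange v hv (fe + 1 - fs).toNat fs (fe + 1) (q * v) rfl
        (dvd_mul_left v q) hq2
        (by linarith [hq1, (by ring : (q - 1) * v = q * v - v)])
    have hS : ∀ x : Int,
        x ∈ seqSampSkipSet v (fe - fs + 1 - ns) (PySem.List.pyRange fs (fe + 1) 1) PySem.Set.empty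
          ↔ x ∈ (PySem.List.pyRange (q * v) (fe + 1) v).take (fe - fs + 1 - ns).toNat := by
      intro x
      rw [skipSet_mem v _ _ (PySem.List.nodup_pyRange_one fs (fe + 1)) PySem.Set.empty
        (by intro y hy; simp [PySem.Set.empty]) x]
      simp [PySem.Set.empty, PySem.Set.len, hskip]
    rw [PySem.List.foldl_append_ite_eq_filter
      (fun i => i ∉ seqSampSkipSet v (fe - fs + 1 - ns) (PySem.List.pyRange fs (fe + 1) 1) PySem.Set.empty)
      (PySem.List.pyRange fs (fe + 1) 1) []]
    rw [List.nil_append]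
    rw [List.filter_congr (fun x _ => decide_eq_decide.mpr (not_congr (hS x)))]
    have hsub : ((PySem.List.pyRange (q * v) (fe + 1) v).take (fe - fs + 1 - ns).toNat).Sublist
        (PySem.List.pyRange fs (fe + 1) 1) := by
      rw [← hskip]
      exact (List.take_sublist _ _).trans List.filter_sublist
    have hpair := List.Pairwise.sublist hsub (PySem.List.pairwise_lt_pyRange_one fs (fe + 1))
    have hmem : ∀ x ∈ (PySem.List.pyRange (q * v) (fe + 1) v).take (fe - fs + 1 - ns).toNat,
        fs ≤ x ∧ x < fe + 1 := fun x hx => PySem.List.mem_pyRange_one.mp (hsub.subset hx)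
    have hB := segLoop_filter (fe + 1)
      ((PySem.List.pyRange (q * v) (fe + 1) v).take (fe - fs + 1 - ns).toNat) hpair
      (fun x hx => (hmem x hx).2) fs (fun x hx => (hmem x hx).1) []
    rw [List.nil_append] at hB
    exact hB.symm
  · have h2 : fe - fs + 1 ≤ ns := by omega
    simp only [if_neg h, if_pos h2]
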